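-- pv_equiv track=rewrite | github.com/Joozlum/SketchyMaths | sketchymaths/sketchymathmethods/base_n.py | split_divide
-- ===== SOURCE A (Python) =====
-- def split_divide(number, base):
--     x = number // base
--     r = number % base
--     result = [r]
--     if x:
--         if x >= base:
--             result.extend(split_divide(x, base))
--         else:
--             result.append(x)
--     return result
-- ===== SOURCE B (Python) =====
-- def split_divide(number, base):
--     # Two-pass: first collect the chain of successive quotient states,
--     # then map '% base' over it and append the final sub-base quotient.
--     states = [number]
--     q = number // base
--     while q and q >= base:
--         states.append(q)
--         q = q // base
--     result = [s % base for s in states]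
--     if q:
--         result.append(q)
--     return result
-- ===== Notes on version B (the rewrite author's own statement) =====
-- stated objective: alternative
-- what changed: Replaced A's self-recursion by a two-pass scheme: first collect the chain of successive quotient states in a list, then map '% base' over that list and append the final sub-base quotient.
import Mathlib
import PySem

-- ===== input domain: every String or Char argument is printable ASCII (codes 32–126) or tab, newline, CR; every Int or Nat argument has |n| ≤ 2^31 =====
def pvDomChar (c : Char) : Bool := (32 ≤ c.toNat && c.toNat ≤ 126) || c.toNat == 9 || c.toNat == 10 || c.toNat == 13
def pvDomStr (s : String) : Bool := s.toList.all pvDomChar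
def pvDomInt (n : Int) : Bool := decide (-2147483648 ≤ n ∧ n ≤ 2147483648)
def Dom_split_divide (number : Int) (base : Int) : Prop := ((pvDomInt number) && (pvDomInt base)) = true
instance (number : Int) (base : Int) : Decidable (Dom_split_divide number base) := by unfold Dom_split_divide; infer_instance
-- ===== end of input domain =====

-- B replaces A's digit-building self-recursion by a two-pass scheme: collect the
-- chain of quotient states, then map '% base' over it (objective: alternative).

-- ===== PORT A =====
-- A is recursive; the recursion does not terminate on base = 1 (number ≥ 1) or base = -1
-- (number = ±1), which Pre_ excludes, so the port carries a fuel counter that is never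
-- exhausted on inputs satisfying Pre_ (the fuel guard only makes the same computation total).
def split_divide_rec (fuel : Nat) (number : Int) (base : Int) : List Int :=
  match fuel with
  | 0 => []  -- unreachable for inputs admitted by Pre_split_divide
  | fuel + 1 =>
    let x := PySem.Int.floordiv number base
    let r := PySem.Int.mod number base
    if x ≠ 0 then
      if x ≥ base then r :: split_divide_rec fuel x base
      else [r, x]
    else [r]

def split_divide (number : Int) (base : Int) : List Int :=
  split_divide_rec (number.natAbs + 2) number base

-- ===== PORT B =====
-- Pass 1 of Source B: the while-loop collecting the quotient-state chain; returns
-- (states, final q). Same fuel guard, unreachable under Pre_split_divide.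
def split_divide_collect (fuel : Nat) (s : Int) (base : Int) : List Int × Int :=
  match fuel with
  | 0 => ([], 0)  -- unreachable for inputs admitted by Pre_split_divide
  | fuel + 1 =>
    let q := PySem.Int.floordiv s base
    if q ≠ 0 ∧ q ≥ base then
      let p := split_divide_collect fuel q base
      (s :: p.1, p.2)
    else ([s], q)

-- Pass 2: map '% base' over the states, then append the final quotient if nonzero.
def split_divide_alt (number : Int) (base : Int) : List Int :=
  let p := split_divide_collect (number.natAbs + 2) number base
  let result := p.1.map (fun s => PySem.Int.mod s base)
  if p.2 ≠ 0 then result ++ [p.2] else result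

-- ===== PRECONDITION & SPEC =====
-- Pre_ excludes exactly the inputs on which A does not return: base = 0 (ZeroDivisionError)
-- and the infinite recursions base = 1 with number ≥ 1, and base = -1 with number = ±1.
def Pre_split_divide (number : Int) (base : Int) : Prop :=
  base ≠ 0 ∧ ¬(base = 1 ∧ 1 ≤ number) ∧ ¬(base = -1 ∧ (number = 1 ∨ number = -1))
instance (number : Int) (base : Int) : Decidable (Pre_split_divide number base) := by
  unfold Pre_split_divide; infer_instance

def pvWitness_split_divide : Int × Int := (1000, 7)

def Spec_split_divide (number : Int) (base : Int) (out : List Int) : Prop := out = split_divide_alt number base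
instance (number : Int) (base : Int) (out : List Int) : Decidable (Spec_split_divide number base out) := by unfold Spec_split_divide; infer_instance

-- ===== CLAIM (what is proved, stated in full; the proofs are below) =====
def Claim_equal_split_divide : Prop := ∀ (number : Int) (base : Int), Dom_split_divide number base → Pre_split_divide number base → Spec_split_divide number base (split_divide number base)

-- ===== LEMMAS AND PROOFS =====

-- B's two passes compose to A's recursion, for every fuel and every input.
theorem collect_eq_rec (fuel : Nat) (base : Int) : ∀ s : Int,
    ((split_divide_collect fuel s base).1.map (fun t => PySem.Int.mod t base)
      ++ (if (split_divide_collect fuel s base).2 ≠ 0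
            then [(split_divide_collect fuel s base).2] else []))
    = split_divide_rec fuel s base := by
  induction fuel with
  | zero => intro s; simp [split_divide_collect, split_divide_rec]
  | succ fuel ih =>
    intro s
    by_cases h0 : PySem.Int.floordiv s base = 0
    · simp [split_divide_collect, split_divide_rec, h0]
    · by_cases hge : PySem.Int.floordiv s base ≥ base
      · have hq : PySem.Int.floordiv s base ≠ 0 ∧ PySem.Int.floordiv s base ≥ base := ⟨h0, hge⟩
        simp only [split_divide_collect, split_divide_rec, if_pos hq, if_pos h0,
          if_pos hge, List.map_cons, List.cons_append]
        exact congrArg (PySem.Int.mod s base :: ·) (ih (PySem.Int.floordiv s base))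
      · simp [split_divide_collect, split_divide_rec, h0, hge]

-- ===== VERDICT (by name: the statement is the Claim_ definition above) =====
theorem split_divide_spec : Claim_equal_split_divide := by
  intro number base _ _
  show split_divide number base = split_divide_alt number base
  rw [split_divide, split_divide_alt, ← collect_eq_rec]
  split_ifs <;> simp
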